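-- pv_equiv track=rewrite | github.com/zqwei/stock_tracker_and_action | src/portfolio_assistant/analytics/reconciliation.py | _sample_symbols
-- ===== SOURCE A (Python) =====
-- from typing import Any, Callable
--
-- def _normalize_text(value: Any) -> str:
--     return str(value or "").strip()
--
-- def _normalize_symbol(value: Any) -> str:
--     return _normalize_text(value).upper()
--
-- def _sample_symbols(
--     evidence: list[dict[str, Any]], symbol_key: str = "symbol", limit: int = 3
-- ) -> list[str]:
--     seen: list[str] = []
--     for row in evidence:
--         symbol = _normalize_symbol(row.get(symbol_key))
--         if not symbol:
--             continue
--         if symbol in seen: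
--             continue
--         seen.append(symbol)
--         if len(seen) >= limit:
--             break
--     return seen
-- ===== SOURCE B (Python) =====
-- def _normalize_text(value):
--     return str(value or "").strip()
--
-- def _normalize_symbol(value):
--     return _normalize_text(value).upper()
--
-- def _sample_symbols(evidence, symbol_key="symbol", limit=3):
--     # dedup upfront (first-occurrence order), then a separate limiting pass
--     ordered = dict.fromkeys(_normalize_symbol(row.get(symbol_key)) for row in evidence)
--     result = []
--     for sym in ordered:
--         if not sym:
--             continue
--         result.append(sym)
--         if len(result) >= limit:
--             break
--     return result
-- ===== Notes on version B (the rewrite author's own statement) =====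
-- stated objective: idiomatic
-- what changed: B replaces the interleaved membership-check-and-break loop by an upfront dict.fromkeys dedup of all normalized symbols followed by a separate pass that skips the empty string and stops at the limit.
import Mathlib
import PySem

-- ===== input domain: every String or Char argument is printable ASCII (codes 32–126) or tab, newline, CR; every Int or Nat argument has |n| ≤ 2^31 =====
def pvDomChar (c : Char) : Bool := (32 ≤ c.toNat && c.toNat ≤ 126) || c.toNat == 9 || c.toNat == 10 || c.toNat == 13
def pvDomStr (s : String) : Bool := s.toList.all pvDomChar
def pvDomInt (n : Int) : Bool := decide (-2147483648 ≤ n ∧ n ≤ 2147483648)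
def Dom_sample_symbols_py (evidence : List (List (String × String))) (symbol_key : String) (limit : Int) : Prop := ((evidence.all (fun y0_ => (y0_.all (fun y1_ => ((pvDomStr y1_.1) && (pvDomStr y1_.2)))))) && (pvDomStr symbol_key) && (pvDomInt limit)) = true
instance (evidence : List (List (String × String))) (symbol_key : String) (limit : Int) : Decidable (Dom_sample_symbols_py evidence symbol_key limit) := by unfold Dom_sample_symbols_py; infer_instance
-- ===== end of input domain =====

-- B dedups all normalized symbols upfront with dict.fromkeys and then limits in a
-- separate pass, instead of A's interleaved seen-list membership check with break (idiomatic).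


-- shared module helpers: _normalize_text / _normalize_symbol applied to row.get(symbol_key)
-- (str(value or "") on an Option String is exactly getD "")
def pvNormSym (v : Option String) : String :=
  PySem.Str.upper (PySem.Str.strip (v.getD ""))

-- row.get(symbol_key): dict lookup on the association list
def pvRowGet (row : List (String × String)) (k : String) : Option String :=
  (PySem.Dict.mk row).get? k

-- ===== PORT A =====
-- A's loop: seen is both the membership structure and the result; break when len(seen) >= limit
def pvLoopA (key : String) (limit : Int) : List (List (String × String)) → List String → List String
  | [], seen => seen
  | row :: rest, seen =>
    let symbol := pvNormSym (pvRowGet row key)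
    if symbol = "" then pvLoopA key limit rest seen
    else if symbol ∈ seen then pvLoopA key limit rest seen
    else
      let seen' := seen ++ [symbol]
      if limit ≤ PySem.List.len seen' then seen'
      else pvLoopA key limit rest seen'

def sample_symbols_py (evidence : List (List (String × String))) (symbol_key : String) (limit : Int) : List String :=
  pvLoopA symbol_key limit evidence []

-- ===== PORT B =====
-- second pass of B: skip "", append, break once len(result) >= limit
def pvLoopB (limit : Int) : List String → List String → List String
  | [], result => result
  | sym :: rest, result =>
    if sym = "" then pvLoopB limit rest result
    else
      let result' := result ++ [sym]
      if limit ≤ PySem.List.len result' then result'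
      else pvLoopB limit rest result'

def sample_symbols_py_alt (evidence : List (List (String × String))) (symbol_key : String) (limit : Int) : List String :=
  let ordered := PySem.List.dedup (evidence.map (fun row => pvNormSym (pvRowGet row symbol_key)))
  pvLoopB limit ordered []

-- ===== PRECONDITION & SPEC =====
def Spec_sample_symbols_py (evidence : List (List (String × String))) (symbol_key : String) (limit : Int) (out : List String) : Prop := out = sample_symbols_py_alt evidence symbol_key limit
instance (evidence : List (List (String × String))) (symbol_key : String) (limit : Int) (out : List String) : Decidable (Spec_sample_symbols_py evidence symbol_key limit out) := by unfold Spec_sample_symbols_py; infer_instance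

-- ===== CLAIM (what is proved, stated in full; the proofs are below) =====
def Claim_equal_sample_symbols_py : Prop := ∀ (evidence : List (List (String × String))) (symbol_key : String) (limit : Int), Dom_sample_symbols_py evidence symbol_key limit → Spec_sample_symbols_py evidence symbol_key limit (sample_symbols_py evidence symbol_key limit)

-- ===== LEMMAS AND PROOFS =====

-- dedup relative to an already-seen list (proof-only device linking the two loops)
def pvRelDedup (seen : List String) : List String → List String
  | [] => []
  | x :: xs => if x ∈ seen then pvRelDedup seen xs else x :: pvRelDedup (seen ++ [x]) xs

lemma pv_foldl_add_eq (ns : List String) : ∀ (s : List String),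
    ns.foldl PySem.Set.add s = s ++ pvRelDedup s ns := by
  induction ns with
  | nil => intro s; simp [pvRelDedup]
  | cons x xs ih =>
    intro s
    by_cases hx : x ∈ s
    · simp [List.foldl_cons, PySem.Set.add, PySem.Set.contains, hx, pvRelDedup, ih]
    · simp [List.foldl_cons, PySem.Set.add, PySem.Set.contains, hx, pvRelDedup, ih]

lemma pv_main (key : String) (limit : Int) :
    ∀ (ev : List (List (String × String))) (acc dseen : List String),
      (∀ x : String, x ≠ "" → (x ∈ acc ↔ x ∈ dseen)) →
      pvLoopA key limit ev acc
        = pvLoopB limit (pvRelDedup dseen (ev.map (fun row => pvNormSym (pvRowGet row key)))) acc := by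
  intro ev
  induction ev with
  | nil => intro acc dseen _; simp [pvLoopA, pvRelDedup, pvLoopB]
  | cons row rest ih =>
    intro acc dseen h
    simp only [pvLoopA, List.map_cons, pvRelDedup]
    generalize pvNormSym (pvRowGet row key) = x
    by_cases hemp : x = ""
    · subst hemp
      by_cases hd : ("" : String) ∈ dseen
      · rw [if_pos rfl, if_pos hd]
        exact ih acc dseen h
      · rw [if_pos rfl, if_neg hd]
        simp only [pvLoopB, if_true]
        refine ih acc (dseen ++ [""]) ?_
        intro y hy
        rw [h y hy]
        simp only [List.mem_append, List.mem_singleton]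
        constructor
        · exact Or.inl
        · rintro (hc | hc)
          · exact hc
          · exact absurd hc hy
    · by_cases hacc : x ∈ acc
      · have hd : x ∈ dseen := (h x hemp).mp hacc
        rw [if_neg hemp, if_pos hacc, if_pos hd]
        exact ih acc dseen h
      · have hd : x ∉ dseen := fun hc => hacc ((h x hemp).mpr hc)
        rw [if_neg hemp, if_neg hacc, if_neg hd]
        simp only [pvLoopB, if_neg hemp]
        by_cases hlim : limit ≤ PySem.List.len (acc ++ [x])
        · rw [if_pos hlim, if_pos hlim]
        · rw [if_neg hlim, if_neg hlim]
          refine ih (acc ++ [x]) (dseen ++ [x]) ?_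
          intro y hy
          simp [List.mem_append, h y hy]

-- ===== VERDICT (by name: the statement is the Claim_ definition above) =====
theorem sample_symbols_py_spec : Claim_equal_sample_symbols_py := by
  intro evidence symbol_key limit _
  show _ = _
  unfold sample_symbols_py sample_symbols_py_alt
  rw [pv_main symbol_key limit evidence [] [] (by simp)]
  congr 1
  have := pv_foldl_add_eq (evidence.map (fun row => pvNormSym (pvRowGet row symbol_key))) []
  simp only [List.nil_append] at this
  simp [PySem.List.dedup_eq_ofList, PySem.Set.ofList_eq_foldl, this]
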